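-- pv_equiv track=rewrite | github.com/akira17189-create/battle-game | tools/sim_merit_20.py | merit_grade
-- ===== SOURCE A (Python) =====
-- MERIT_GRADE_RULES_DESC = [
--     (90000, "神将"),
--     (80000, "飞将"),
--     (70000, "名将"),
--     (55000, "骁将"),
--     (45000, "健将"),
--     (40001, "勇将"),
-- ]
--
-- def merit_grade(final_score: int) -> str:
--     if final_score >= 100000:
--         return "天命"
--     if final_score <= 40000:
--         return "战将"
--     for min_score, name in MERIT_GRADE_RULES_DESC:
--         if final_score >= min_score:
--             return name
--     return "战将"
-- ===== SOURCE B (Python) =====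
-- import bisect
--
-- MERIT_BOUNDS = [40001, 45000, 55000, 70000, 80000, 90000, 100000]
-- MERIT_NAMES = ["战将", "勇将", "健将", "骁将", "名将", "飞将", "神将", "天命"]
--
-- def merit_grade(final_score: int) -> str:
--     return MERIT_NAMES[bisect.bisect_right(MERIT_BOUNDS, final_score)]
-- ===== Notes on version B (the rewrite author's own statement) =====
-- stated objective: idiomatic
-- what changed: Replaces the two guards plus a descending linear scan of threshold rules with a single binary search (bisect_right) over an ascending boundaries table indexing a parallel names list.
import Mathlib
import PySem

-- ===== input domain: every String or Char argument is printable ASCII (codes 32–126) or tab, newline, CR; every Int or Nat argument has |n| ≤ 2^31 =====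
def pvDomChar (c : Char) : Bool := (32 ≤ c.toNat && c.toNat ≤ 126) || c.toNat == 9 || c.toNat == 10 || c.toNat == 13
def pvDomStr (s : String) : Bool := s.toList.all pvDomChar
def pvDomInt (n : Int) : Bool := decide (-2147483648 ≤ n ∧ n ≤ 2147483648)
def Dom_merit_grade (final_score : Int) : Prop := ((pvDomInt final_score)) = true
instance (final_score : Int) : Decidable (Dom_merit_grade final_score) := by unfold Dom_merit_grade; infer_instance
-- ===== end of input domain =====

-- B replaces the guards + descending linear rule scan with a bisect_right binary search over an ascending boundaries table (idiomatic; return value only, no side effects).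

-- ===== PORT A =====
def MERIT_GRADE_RULES_DESC : List (Int × String) :=
  [(90000, "神将"), (80000, "飞将"), (70000, "名将"),
   (55000, "骁将"), (45000, "健将"), (40001, "勇将")]

-- the for-loop with early return, as structural recursion over the rule list
def meritScan (final_score : Int) : List (Int × String) → String
  | [] => "战将"
  | (min_score, name) :: rest =>
      if final_score ≥ min_score then name else meritScan final_score rest

def merit_grade (final_score : Int) : String :=
  if final_score ≥ 100000 then "天命"
  else if final_score ≤ 40000 then "战将"
  else meritScan final_score MERIT_GRADE_RULES_DESC

-- ===== PORT B =====
def MERIT_BOUNDS : List Int := [40001, 45000, 55000, 70000, 80000, 90000, 100000]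
def MERIT_NAMES : List String := ["战将", "勇将", "健将", "骁将", "名将", "飞将", "神将", "天命"]

-- bisect.bisect_right ported as the standard lo/hi binary search (fuel = list length bounds the iterations)
def bisectRightAux (xs : List Int) (x : Int) : Nat → Nat → Nat → Nat
  | 0, lo, _ => lo
  | fuel + 1, lo, hi =>
      if lo < hi then
        let mid := (lo + hi) / 2
        if x < xs.getD mid 0 then bisectRightAux xs x fuel lo mid
        else bisectRightAux xs x fuel (mid + 1) hi
      else lo

def bisectRight (xs : List Int) (x : Int) : Nat :=
  bisectRightAux xs x xs.length 0 xs.length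

def merit_grade_alt (final_score : Int) : String :=
  MERIT_NAMES.getD (bisectRight MERIT_BOUNDS final_score) ""

-- ===== PRECONDITION & SPEC =====
def Spec_merit_grade (final_score : Int) (out : String) : Prop := out = merit_grade_alt final_score
instance (final_score : Int) (out : String) : Decidable (Spec_merit_grade final_score out) := by unfold Spec_merit_grade; infer_instance

-- ===== CLAIM (what is proved, stated in full; the proofs are below) =====
def Claim_equal_merit_grade : Prop := ∀ (final_score : Int), Dom_merit_grade final_score → Spec_merit_grade final_score (merit_grade final_score)

-- ===== LEMMAS AND PROOFS =====

-- ===== VERDICT (by name: the statement is the Claim_ definition above) =====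
theorem merit_grade_spec : Claim_equal_merit_grade := by
  intro s _
  unfold Spec_merit_grade merit_grade merit_grade_alt meritScan bisectRight bisectRightAux
  simp only [MERIT_GRADE_RULES_DESC, MERIT_BOUNDS, MERIT_NAMES, List.length, List.getD]
  norm_num [bisectRightAux, meritScan]
  split_ifs <;> first | rfl | omega
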